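-- pv_equiv track=rewrite | github.com/systems-biology-lirui/Project_colorieeg_2026 | testcode/audit_sec3_s4_electrode_selection.py | invert_roi_map
-- ===== SOURCE A (Python) =====
-- def invert_roi_map(roi_map):
--     channel_to_rois = {}
--     for roi_name, channels in roi_map.items():
--         for channel_name in channels:
--             channel_to_rois.setdefault(channel_name, []).append(roi_name)
--     for channel_name in channel_to_rois:
--         channel_to_rois[channel_name] = sorted(set(channel_to_rois[channel_name]))
--     return channel_to_rois
-- ===== SOURCE B (Python) =====
-- def invert_roi_map(roi_map):
--     channels = dict.fromkeys(ch for chs in roi_map.values() for ch in chs)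
--     rois_sorted = sorted(roi_map)
--     return {ch: [r for r in rois_sorted if ch in roi_map[r]] for ch in channels}
-- ===== Notes on version B (the rewrite author's own statement) =====
-- stated objective: simpler
-- what changed: B drops A's grouping dict and per-channel sorted(set(...)) pass: it dedups the channel occurrences once and builds each channel's value by filtering the pre-sorted roi-name list, producing already-sorted, already-unique lists.
import Mathlib
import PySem

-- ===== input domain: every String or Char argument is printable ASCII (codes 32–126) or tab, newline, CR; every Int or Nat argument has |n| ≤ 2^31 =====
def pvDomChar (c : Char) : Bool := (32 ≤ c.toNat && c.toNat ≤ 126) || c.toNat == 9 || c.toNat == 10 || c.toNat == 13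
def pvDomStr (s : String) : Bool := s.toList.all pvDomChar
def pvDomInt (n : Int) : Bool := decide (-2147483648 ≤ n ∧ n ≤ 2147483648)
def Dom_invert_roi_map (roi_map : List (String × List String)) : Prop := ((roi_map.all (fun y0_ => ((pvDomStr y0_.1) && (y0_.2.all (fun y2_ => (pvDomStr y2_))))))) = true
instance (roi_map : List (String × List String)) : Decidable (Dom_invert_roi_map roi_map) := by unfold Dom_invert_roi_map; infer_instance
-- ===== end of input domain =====

-- B inverts the map without A's grouping dict: it dedups the channel occurrences and, for each
-- channel, filters the pre-sorted roi-name list, so the per-channel sorted(set(...)) pass disappears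
-- (objective: simpler; not claimed faster).

-- ===== PORT A =====
def invert_roi_map (roi_map : List (String × List String)) : List (String × List String) :=
  -- channel_to_rois = {}; for roi_name, channels in roi_map.items(): for channel_name in channels:
  --   channel_to_rois.setdefault(channel_name, []).append(roi_name)   (= modify with default [])
  let d : PySem.Dict String (List String) :=
    roi_map.foldl
      (fun d p => p.2.foldl (fun d ch => d.modify ch [] (fun v => v ++ [p.1])) d)
      PySem.Dict.empty
  -- for channel_name in channel_to_rois: channel_to_rois[ch] = sorted(set(channel_to_rois[ch]))
  let d2 : PySem.Dict String (List String) :=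
    d.keys.foldl
      (fun acc ch => acc.modify ch [] (fun v => PySem.List.sorted (PySem.Set.ofList v) (fun x => x)))
      d
  d2.items

-- ===== PORT B =====
def invert_roi_map_alt (roi_map : List (String × List String)) : List (String × List String) :=
  -- channels = dict.fromkeys(ch for chs in roi_map.values() for ch in chs)
  let channels : List String := PySem.List.dedup (roi_map.flatMap (fun p => p.2))
  -- rois_sorted = sorted(roi_map)   (iterates the dict's keys)
  let rois_sorted : List String := PySem.List.sorted (roi_map.map (fun p => p.1)) (fun x => x)
  -- {ch: [r for r in rois_sorted if ch in roi_map[r]] for ch in channels}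
  channels.map (fun ch =>
    (ch, rois_sorted.filter (fun r => decide (ch ∈ (PySem.Dict.mk roi_map).getD r []))))

-- ===== PRECONDITION & SPEC =====
-- Pre_ only states that the keys of the association list are distinct: the Python argument is a
-- dict, whose keys are always distinct, so no Python input is excluded; an association list with a
-- repeated key represents no dict and the two ports need not agree on it.
def Pre_invert_roi_map (roi_map : List (String × List String)) : Prop :=
  (roi_map.map Prod.fst).Nodup
instance (roi_map : List (String × List String)) : Decidable (Pre_invert_roi_map roi_map) := by
  unfold Pre_invert_roi_map; infer_instance

def pvWitness_invert_roi_map : (List (String × List String)) :=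
  [("occipital", ["O1", "O2", "Oz"]), ("parietal", ["P3", "O2"]), ("frontal", [])]

def Spec_invert_roi_map (roi_map : List (String × List String)) (out : List (String × List String)) : Prop := out = invert_roi_map_alt roi_map
instance (roi_map : List (String × List String)) (out : List (String × List String)) : Decidable (Spec_invert_roi_map roi_map out) := by unfold Spec_invert_roi_map; infer_instance

-- ===== CLAIM (what is proved, stated in full; the proofs are below) =====
def Claim_equal_invert_roi_map : Prop := ∀ (roi_map : List (String × List String)), Dom_invert_roi_map roi_map → Pre_invert_roi_map roi_map → Spec_invert_roi_map roi_map (invert_roi_map roi_map)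

-- ===== LEMMAS AND PROOFS =====

-- the (channel, roi) occurrence pairs, in A's traversal order
def pvPairs (roi_map : List (String × List String)) : List (String × String) :=
  roi_map.flatMap (fun p => p.2.map (fun ch => (ch, p.1)))

lemma pvFold_eq_pairs_fold (roi_map : List (String × List String)) :
    roi_map.foldl
      (fun d p => p.2.foldl (fun d ch => d.modify ch [] (fun v => v ++ [p.1])) d)
      (PySem.Dict.empty : PySem.Dict String (List String))
    = (pvPairs roi_map).foldl (fun d q => d.modify q.1 [] (fun v => v ++ [q.2]))
        PySem.Dict.empty := by
  rw [pvPairs, List.foldl_flatMap]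
  simp [List.foldl_map]

lemma pvKeys_foldl_modify (l : List (String × String)) (d : PySem.Dict String (List String)) :
    (l.foldl (fun d q => d.modify q.1 [] (fun v => v ++ [q.2])) d).keys
      = PySem.Set.update d.keys (l.map Prod.fst) := by
  induction l generalizing d with
  | nil => simp [PySem.Set.update]
  | cons q l ih =>
      simp only [List.foldl_cons, List.map_cons, PySem.Set.update_cons, ih]
      congr 1
      rw [PySem.Dict.keys_modify, PySem.Set.add_eq_ite]
      by_cases h : q.1 ∈ d.keys
      · rw [PySem.Dict.keys_insert_of_contains, if_pos h]
        exact (PySem.Dict.contains_iff_mem_keys _ _).2 h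
      · rw [PySem.Dict.keys_insert_of_not_contains, if_neg h]
        simp only [← PySem.Dict.contains_iff_mem_keys] at h
        simpa using h

-- keys of the second pass: unchanged (every key is already present)
lemma pvKeys_second_pass (F : List String → List String) (ks : List String)
    (d : PySem.Dict String (List String)) (h : ∀ k ∈ ks, k ∈ d.keys) :
    (ks.foldl (fun acc ch => acc.modify ch [] F) d).keys = d.keys := by
  induction ks generalizing d with
  | nil => rfl
  | cons k ks ih =>
      have hk : k ∈ d.keys := h k (by simp)
      have hkeys : (d.modify k [] F).keys = d.keys := by
        rw [PySem.Dict.keys_modify, PySem.Dict.keys_insert_of_contains]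
        exact (PySem.Dict.contains_iff_mem_keys _ _).2 hk
      rw [List.foldl_cons, ih _ (fun k' hk' => by rw [hkeys]; exact h k' (by simp [hk']))]
      exact hkeys

lemma pvGetD_second_pass (F : List String → List String) (ks : List String)
    (d : PySem.Dict String (List String)) (hnd : ks.Nodup) (x : String) :
    (ks.foldl (fun acc ch => acc.modify ch [] F) d).getD x []
      = if x ∈ ks then F (d.getD x []) else d.getD x [] := by
  induction ks generalizing d with
  | nil => simp
  | cons k ks ih =>
      simp only [List.nodup_cons] at hnd
      rw [List.foldl_cons, ih _ hnd.2, PySem.Dict.getD_modify]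
      by_cases hx : x ∈ ks
      · have hxk : x ≠ k := fun h => hnd.1 (h ▸ hx)
        simp [hx, hxk]
      · by_cases hxk : x = k
        · simp [hxk, hnd.1]
        · simp [hx, hxk]

-- a dict with distinct keys is its key list paired with its lookups
lemma pvItems_eq_map_keys (l : List (String × List String))
    (h : (l.map Prod.fst).Nodup) (d0 : List String) :
    l = (l.map Prod.fst).map (fun k => (k, (PySem.Dict.mk l).getD k d0)) := by
  induction l with
  | nil => rfl
  | cons p l ih =>
      simp only [List.map_cons, List.nodup_cons] at h ⊢
      have hhead : (PySem.Dict.mk (p :: l)).getD p.1 d0 = p.2 := by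
        simp [PySem.Dict.getD, PySem.Dict.get?, List.find?]
      have htail : ∀ k ∈ l.map Prod.fst,
          (PySem.Dict.mk (p :: l)).getD k d0 = (PySem.Dict.mk l).getD k d0 := by
        intro k hk
        have hne : ¬ (p.1 == k) = true := by
          simp only [beq_iff_eq]; intro he; exact h.1 (he ▸ hk)
        simp [PySem.Dict.getD, PySem.Dict.get?, List.find?, hne]
      have ht : List.map (fun k => (k, (PySem.Dict.mk (p :: l)).getD k d0)) (List.map Prod.fst l)
              = List.map (fun k => (k, (PySem.Dict.mk l).getD k d0)) (List.map Prod.fst l) :=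
        List.map_congr_left (fun k hk => by rw [htail k hk])
      rw [hhead, ht, ← ih h.2]

-- membership bridge: roi r maps channel ch  ↔  r is a key and ch is in its channel list
lemma pvMem_bridge (rm : List (String × List String)) (hpre : (rm.map Prod.fst).Nodup)
    (ch r : String) :
    (∃ p ∈ rm, p.1 = r ∧ ch ∈ p.2) ↔
      r ∈ rm.map Prod.fst ∧ ch ∈ (PySem.Dict.mk rm).getD r [] := by
  have hkeys : (PySem.Dict.mk rm).keys.Nodup := by simpa using hpre
  constructor
  · rintro ⟨p, hp, h1, h2⟩
    subst h1
    refine ⟨List.mem_map.2 ⟨p, hp, rfl⟩, ?_⟩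
    have hg : (PySem.Dict.mk rm).getD p.1 [] = p.2 :=
      PySem.Dict.getD_of_mem_items _ (by simpa using hp) hkeys []
    exact hg ▸ h2
  · rintro ⟨hr, hch⟩
    obtain ⟨p, hp, h1⟩ := List.mem_map.1 hr
    subst h1
    have hg : (PySem.Dict.mk rm).getD p.1 [] = p.2 :=
      PySem.Dict.getD_of_mem_items _ (by simpa using hp) hkeys []
    exact ⟨p, hp, rfl, hg ▸ hch⟩

-- per-channel value: A's sorted(set(collected rois)) = B's filter of the sorted key list
lemma pvValue_eq (rm : List (String × List String)) (hpre : (rm.map Prod.fst).Nodup)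
    (ch : String) :
    PySem.List.sorted
        (PySem.Set.ofList ((((pvPairs rm).filter (fun q => q.1 == ch)).map Prod.snd)))
        (fun x => x)
      = (PySem.List.sorted (rm.map Prod.fst) (fun x => x)).filter
          (fun r => decide (ch ∈ (PySem.Dict.mk rm).getD r [])) := by
  have hL : (PySem.List.sorted
      (PySem.Set.ofList ((((pvPairs rm).filter (fun q => q.1 == ch)).map Prod.snd)))
      (fun x => x)).Pairwise (· < ·) := PySem.List.sorted_ofList_pairwise_lt _
  have hRSnd : (PySem.List.sorted (rm.map Prod.fst) (fun x => x)).Nodup :=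
    ((PySem.List.sorted_perm _ _ _).nodup_iff).2 hpre
  have hRS : (PySem.List.sorted (rm.map Prod.fst) (fun x => x)).Pairwise (· < ·) :=
    ((PySem.List.sorted_pairwise (rm.map Prod.fst) (fun x => x)).and hRSnd).imp
      (fun h => lt_of_le_of_ne h.1 h.2)
  have hR : ((PySem.List.sorted (rm.map Prod.fst) (fun x => x)).filter
      (fun r => decide (ch ∈ (PySem.Dict.mk rm).getD r []))).Pairwise (· < ·) :=
    hRS.filter _
  have hmem : ∀ r, r ∈ PySem.List.sorted
      (PySem.Set.ofList ((((pvPairs rm).filter (fun q => q.1 == ch)).map Prod.snd)))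
      (fun x => x) ↔
      r ∈ (PySem.List.sorted (rm.map Prod.fst) (fun x => x)).filter
        (fun r => decide (ch ∈ (PySem.Dict.mk rm).getD r [])) := by
    intro r
    rw [PySem.List.mem_sorted, PySem.Set.mem_ofList, List.mem_filter,
      PySem.List.mem_sorted]
    simp only [decide_eq_true_eq]
    rw [← pvMem_bridge rm hpre ch r]
    simp [pvPairs]
  have hperm := (List.perm_ext_iff_of_nodup
    (hL.imp (fun h => ne_of_lt h)) (hR.imp (fun h => ne_of_lt h))).2 hmem
  exact PySem.List.eq_of_perm_of_pairwise_le_of_injective (fun x => x)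
    (fun _ _ h => h) hperm (hL.imp le_of_lt) (hR.imp le_of_lt)

lemma pvPairs_map_fst (rm : List (String × List String)) :
    (pvPairs rm).map Prod.fst = rm.flatMap (fun p => p.2) := by
  simp [pvPairs, List.map_flatMap, Function.comp_def]

theorem invert_roi_map_spec : Claim_equal_invert_roi_map := by
  intro rm _ hpre
  unfold Spec_invert_roi_map invert_roi_map invert_roi_map_alt
  dsimp only []
  rw [pvFold_eq_pairs_fold]
  set d1 := (pvPairs rm).foldl (fun d q => d.modify q.1 [] (fun v => v ++ [q.2]))
    (PySem.Dict.empty : PySem.Dict String (List String)) with hd1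
  have hkeys : d1.keys = PySem.Set.ofList (rm.flatMap (fun p => p.2)) := by
    rw [hd1, pvKeys_foldl_modify, pvPairs_map_fst]
    simpa using PySem.Set.update_nil_left (rm.flatMap (fun p => p.2))
  have hknd : d1.keys.Nodup := by rw [hkeys]; exact PySem.Set.nodup_ofList _
  set F := fun v => PySem.List.sorted (PySem.Set.ofList v) (fun x : String => x) with hF
  set d2 := d1.keys.foldl (fun acc ch => acc.modify ch [] F) d1 with hd2
  have hk2 : d2.keys = d1.keys := pvKeys_second_pass F d1.keys d1 (fun _ h => h)
  have hk2nd : (d2.items.map Prod.fst).Nodup := by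
    have : d2.items.map Prod.fst = d2.keys := rfl
    rw [this, hk2]; exact hknd
  have hitems : d2.items = (d2.items.map Prod.fst).map (fun k => (k, d2.getD k [])) :=
    pvItems_eq_map_keys d2.items hk2nd []
  have hkf : d2.items.map Prod.fst = d1.keys := by
    rw [show d2.items.map Prod.fst = d2.keys from rfl, hk2]
  rw [hitems, hkf, hkeys]
  rw [PySem.List.dedup_eq_ofList]
  apply List.map_congr_left
  intro ch hch
  have hch1 : ch ∈ d1.keys := by rw [hkeys]; exact hch
  have hget2 : d2.getD ch [] = F (d1.getD ch []) := by
    rw [hd2, pvGetD_second_pass F d1.keys d1 hknd ch, if_pos hch1]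
  have hget1 : d1.getD ch [] = ((pvPairs rm).filter (fun q => q.1 == ch)).map Prod.snd := by
    rw [hd1, PySem.Dict.getD_foldl_modify_append, PySem.Dict.getD_empty]
    simp
  rw [hget2, hget1, hF]
  exact congrArg (fun v => (ch, v)) (pvValue_eq rm hpre ch)
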